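-- pv_equiv track=rewrite | github.com/cpauldev/phrasedreamgpt | dreamphrasegpt/runtime.py | resolve_block_attnres_layout
-- ===== SOURCE A (Python) =====
-- def resolve_block_attnres_layout(
--     total_residual_sites: int,
--     requested_block_count: int,
-- ) -> tuple[int, tuple[int, ...]]:
--     block_count = min(requested_block_count, total_residual_sites)
--     base_block_layers = total_residual_sites // block_count
--     remainder = total_residual_sites % block_count
--     block_end_indices: list[int] = []
--     next_end = -1
--
--     for block_index in range(block_count):
--         block_layers = base_block_layers
--         if block_index == block_count - 1:
--             block_layers += remainder
--         next_end += block_layers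
--         block_end_indices.append(next_end)
--
--     return block_count, tuple(block_end_indices)
-- ===== SOURCE B (Python) =====
-- def resolve_block_attnres_layout(
--     total_residual_sites: int,
--     requested_block_count: int,
-- ) -> tuple[int, tuple[int, ...]]:
--     block_count = min(requested_block_count, total_residual_sites)
--     base, remainder = divmod(total_residual_sites, block_count)
--     if block_count <= 0:
--         return block_count, ()
--     # closed form: end[i] = base*(i+1) - 1, and the last end is always total - 1
--     ends = tuple(range(base - 1, base * block_count - 1, base)) + (total_residual_sites - 1,)
--     return block_count, ends
-- ===== Notes on version B (the rewrite author's own statement) =====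
-- stated objective: simpler
-- what changed: Replaces the running-accumulator loop that adds each block's layer count with a closed-form arithmetic range of end indices (end[i] = base*(i+1)-1) plus total-1 as the last element.
import Mathlib
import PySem

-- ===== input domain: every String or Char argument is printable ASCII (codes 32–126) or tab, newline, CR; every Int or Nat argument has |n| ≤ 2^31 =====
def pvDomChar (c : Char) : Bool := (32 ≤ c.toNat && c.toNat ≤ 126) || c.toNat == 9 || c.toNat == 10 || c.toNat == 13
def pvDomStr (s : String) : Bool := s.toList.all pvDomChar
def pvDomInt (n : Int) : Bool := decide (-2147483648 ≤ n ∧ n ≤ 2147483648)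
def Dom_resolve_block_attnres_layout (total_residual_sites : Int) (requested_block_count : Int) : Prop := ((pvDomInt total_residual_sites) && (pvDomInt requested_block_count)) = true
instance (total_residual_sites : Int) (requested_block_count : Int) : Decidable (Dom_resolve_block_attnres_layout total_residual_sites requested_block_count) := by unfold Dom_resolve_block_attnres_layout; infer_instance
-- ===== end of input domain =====

-- B replaces A's running-accumulator loop with a closed-form range of end indices (simpler decomposition, same cost).

-- ===== PORT A =====
-- the body of A's for-loop (state = (block_end_indices, next_end))
def pvStepA (base remainder block_count : Int) (st : List Int × Int) (block_index : Int) : List Int × Int :=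
  let block_layers := base
  let block_layers := if block_index == block_count - 1 then block_layers + remainder else block_layers
  let next_end := st.2 + block_layers
  (st.1 ++ [next_end], next_end)

def resolve_block_attnres_layout (total_residual_sites : Int) (requested_block_count : Int) : Int × List Int :=
  let block_count := min requested_block_count total_residual_sites
  let base_block_layers := PySem.Int.floordiv total_residual_sites block_count
  let remainder := PySem.Int.mod total_residual_sites block_count
  let st := (PySem.List.pyRange 0 block_count 1).foldl (pvStepA base_block_layers remainder block_count) ([], -1)
  (block_count, st.1)

-- ===== PORT B =====
def resolve_block_attnres_layout_alt (total_residual_sites : Int) (requested_block_count : Int) : Int × List Int :=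
  let block_count := min requested_block_count total_residual_sites
  let base := PySem.Int.floordiv total_residual_sites block_count
  let _remainder := PySem.Int.mod total_residual_sites block_count
  if block_count ≤ 0 then (block_count, [])
  else (block_count, PySem.List.pyRange (base - 1) (base * block_count - 1) base ++ [total_residual_sites - 1])

-- ===== PRECONDITION & SPEC =====
-- Pre_ excludes exactly the inputs with min(requested_block_count, total_residual_sites) == 0,
-- where A raises ZeroDivisionError (B raises there too).
def Pre_resolve_block_attnres_layout (total_residual_sites : Int) (requested_block_count : Int) : Prop :=
  min requested_block_count total_residual_sites ≠ 0
instance (total_residual_sites : Int) (requested_block_count : Int) : Decidable (Pre_resolve_block_attnres_layout total_residual_sites requested_block_count) := by unfold Pre_resolve_block_attnres_layout; infer_instance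

def pvWitness_resolve_block_attnres_layout : Int × Int := (11, 3)

def Spec_resolve_block_attnres_layout (total_residual_sites : Int) (requested_block_count : Int) (out : Int × List Int) : Prop := out = resolve_block_attnres_layout_alt total_residual_sites requested_block_count
instance (total_residual_sites : Int) (requested_block_count : Int) (out : Int × List Int) : Decidable (Spec_resolve_block_attnres_layout total_residual_sites requested_block_count out) := by unfold Spec_resolve_block_attnres_layout; infer_instance

-- ===== CLAIM (what is proved, stated in full; the proofs are below) =====
def Claim_equal_resolve_block_attnres_layout : Prop := ∀ (total_residual_sites : Int) (requested_block_count : Int), Dom_resolve_block_attnres_layout total_residual_sites requested_block_count → Pre_resolve_block_attnres_layout total_residual_sites requested_block_count → Spec_resolve_block_attnres_layout total_residual_sites requested_block_count (resolve_block_attnres_layout total_residual_sites requested_block_count)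

-- ===== LEMMAS AND PROOFS =====

-- A's fold over the first n iterations (n strictly before the last block): closed-form state
lemma pvFoldA_prefix (base rem bc : Int) (n : Nat) (h : (n : Int) ≤ bc - 1) :
    (PySem.List.pyRange 0 (n : Int) 1).foldl (pvStepA base rem bc) ([], -1)
      = ((List.range n).map (fun (k : Nat) => base * ((k : Int) + 1) - 1), base * n - 1) := by
  induction n with
  | zero => simp
  | succ m ih =>
    have hm : (m : Int) ≤ bc - 1 := by push_cast at h ⊢; omega
    have hne : ¬ ((m : Int) == bc - 1) = true := by
      simp only [beq_iff_eq]; push_cast at h; omega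
    rw [show ((m + 1 : Nat) : Int) = (m : Int) + 1 by push_cast; ring,
        PySem.List.pyRange_one_succ_right (by positivity), List.foldl_append, ih hm]
    simp only [List.foldl, pvStepA, hne, Bool.false_eq_true, if_false, List.range_succ,
      List.map_append, List.map, Prod.mk.injEq]
    constructor
    · congr 1; ring_nf
    · ring_nf

-- B's range is the list of the first bc-1 end indices
lemma pvRangeB (base bc : Int) (hbase : 1 ≤ base) (hbc : 0 < bc) :
    PySem.List.pyRange (base - 1) (base * bc - 1) base
      = (List.range (bc - 1).toNat).map (fun (k : Nat) => base * ((k : Int) + 1) - 1) := by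
  rw [PySem.List.pyRange_of_pos _ _ (by omega)]
  have hcount : (if base - 1 < base * bc - 1 then ((base * bc - 1 - (base - 1) + base - 1) / base).toNat else 0)
      = (bc - 1).toNat := by
    by_cases hlt : base - 1 < base * bc - 1
    · rw [if_pos hlt]
      have : base * bc - 1 - (base - 1) + base - 1 = (base - 1) + base * (bc - 1) := by ring
      rw [this, Int.add_mul_ediv_left _ _ (by omega : base ≠ 0),
          Int.ediv_eq_zero_of_lt (by omega) (by omega)]
      omega
    · rw [if_neg hlt]
      have h1 : bc = 1 := by nlinarith [mul_le_mul_of_nonneg_left (by omega : (1:Int) ≤ bc) (by omega : (0:Int) ≤ base)]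
      simp [h1]
  rw [hcount]
  exact List.map_congr_left (fun k _ => by ring)

lemma pvMain (t r : Int) (_h : min r t ≠ 0) :
    resolve_block_attnres_layout t r = resolve_block_attnres_layout_alt t r := by
  unfold resolve_block_attnres_layout resolve_block_attnres_layout_alt
  set bc := min r t with hbc
  by_cases hneg : bc ≤ 0
  · simp only [if_pos hneg, PySem.List.pyRange_one_eq_nil (by omega : bc ≤ 0), List.foldl_nil]
  · have hpos : 0 < bc := by omega
    simp only [if_neg hneg]
    set base := PySem.Int.floordiv t bc with hbase
    set rem := PySem.Int.mod t bc with hrem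
    have hbt : bc ≤ t := min_le_right r t
    have hbase1 : 1 ≤ base := by
      rw [hbase]; exact (PySem.Int.le_floordiv_iff_mul_le hpos).mpr (by omega)
    have hsum : base * bc + rem = t := by
      have := PySem.Int.floordiv_mul_add_mod t bc
      rw [← hbase, ← hrem] at this; linarith [this]
    have hsplit : PySem.List.pyRange 0 bc 1
        = PySem.List.pyRange 0 (bc - 1) 1 ++ [bc - 1] := by
      have := PySem.List.pyRange_one_succ_right (a := 0) (b := bc - 1) (by omega)
      simpa using this
    have hn : ((bc - 1).toNat : Int) = bc - 1 := Int.toNat_of_nonneg (by omega)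
    rw [hsplit, List.foldl_append]
    rw [show PySem.List.pyRange 0 (bc - 1) 1 = PySem.List.pyRange 0 (((bc - 1).toNat : Nat) : Int) 1 by rw [hn]]
    rw [pvFoldA_prefix base rem bc _ (by omega)]
    simp only [List.foldl, pvStepA, beq_self_eq_true, if_pos, hn]
    rw [pvRangeB base bc hbase1 hpos]
    have hlast : base * (bc - 1) - 1 + (base + rem) = t - 1 := by linarith
    rw [hlast]

-- ===== VERDICT (by name: the statement is the Claim_ definition above) =====
theorem resolve_block_attnres_layout_spec : Claim_equal_resolve_block_attnres_layout := by
  intro t r _ hpre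
  unfold Spec_resolve_block_attnres_layout
  exact pvMain t r hpre
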